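-- pv_equiv track=rewrite | github.com/debugByPrintln/AI_lab2_second_part | src/firstPart/five.py | limitedDepthSearch
-- ===== SOURCE A (Python) =====
-- def limitedDepthSearch(graph, start, end, visited, depth, searchDepth):
--     if start == end:
--         visited.append(start)
--         return True
--     if start in visited:
--         return False
--     depth += 1
--     visited.append(start)
--     for currentCity in graph[start]:
--         if currentCity not in visited and depth <= searchDepth:
--             result = limitedDepthSearch(graph, currentCity, end, visited, depth, searchDepth)
--             if result:
--                 return True
-- ===== SOURCE B (Python) =====
-- # Iterative re-implementation: explicit LIFO stack of (node, depth) frames instead of recursion.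
-- # Matches A exactly: same True/False/None result, same in-place growth of visited,
-- # and the same KeyError on a reached node with no adjacency entry.
-- def limitedDepthSearch(graph, start, end, visited, depth, searchDepth):
--     if start == end:
--         visited.append(start)
--         return True
--     if start in visited:
--         return False
--     stack = [(start, depth)]
--     while stack:
--         node, d = stack.pop()
--         if node in visited:
--             continue
--         if node == end:
--             visited.append(node)
--             return True
--         visited.append(node)
--         nbrs = graph[node]
--         nd = d + 1
--         if nd <= searchDepth:
--             for c in reversed(nbrs):
--                 stack.append((c, nd))
--     return None
-- ===== Notes on version B (the rewrite author's own statement) =====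
-- stated objective: alternative
-- what changed: The recursive depth-limited DFS is replaced by an iterative loop over an explicit LIFO stack of (node, depth) frames, with the visited check done at pop time; the return value (True/False/None), the in-place growth of visited, and the KeyError on dangling references are identical.
-- outside the precondition, e.g. on limitedDepthSearch({'a': ['b']}, 'a', 'z', [], 0, 3): A raises KeyError, B raises KeyError; on limitedDepthSearch({'a': ['b', 'x'], 'b': []}, 'a', 'b', [], 0, 3): A returns True, B returns True; on limitedDepthSearch({'a': ['x']}, 'a', 'z', [], 5, 3): A returns None, B returns None
import Mathlib
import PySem

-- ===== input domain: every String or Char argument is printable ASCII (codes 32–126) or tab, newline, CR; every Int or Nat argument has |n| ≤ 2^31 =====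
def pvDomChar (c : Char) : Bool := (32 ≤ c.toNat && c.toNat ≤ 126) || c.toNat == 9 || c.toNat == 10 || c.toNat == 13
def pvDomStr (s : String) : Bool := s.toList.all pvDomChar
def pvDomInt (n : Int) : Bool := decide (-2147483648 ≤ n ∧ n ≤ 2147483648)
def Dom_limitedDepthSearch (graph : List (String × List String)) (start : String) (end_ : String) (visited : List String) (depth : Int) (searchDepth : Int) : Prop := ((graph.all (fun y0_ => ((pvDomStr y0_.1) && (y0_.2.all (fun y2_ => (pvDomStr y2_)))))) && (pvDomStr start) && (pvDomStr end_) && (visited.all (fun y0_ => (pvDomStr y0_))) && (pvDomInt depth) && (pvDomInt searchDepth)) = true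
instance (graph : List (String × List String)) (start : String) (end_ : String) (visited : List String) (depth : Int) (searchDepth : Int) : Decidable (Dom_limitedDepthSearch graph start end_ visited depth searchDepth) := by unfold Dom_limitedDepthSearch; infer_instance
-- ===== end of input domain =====

-- B replaces A's recursion by an iterative explicit-stack DFS (alternative decomposition, same cost);
-- both Pythons append to `visited` in place in the same pre-order and raise the same KeyError on a
-- reached dangling node — the theorems below are about the return value.

-- ===== PORT A =====

-- Python dict lookup graph[k] on the association list: first match, none = KeyError (exact).
def pyLookup (graph : List (String × List String)) (k : String) : Option (List String) :=
  match graph with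
  | [] => none
  | (k', vs) :: rest => if k' = k then some vs else pyLookup rest k

theorem pyLookup_mem {g : List (String × List String)} {k : String} {vs : List String}
    (h : pyLookup g k = some vs) : (k, vs) ∈ g := by
  induction g with
  | nil => cases h
  | cons p g ih =>
    obtain ⟨k', ws⟩ := p
    by_cases hk : k' = k
    · simp [pyLookup, hk] at h
      simp [hk, h]
    · simp [pyLookup, hk] at h
      exact List.mem_cons_of_mem _ (ih h)

-- number of graph keys not yet visited (termination measure for the B-side stack loop)
def keysNV (graph : List (String × List String)) (v : List String) : Nat :=
  ((graph.map Prod.fst).filter (fun k => decide (k ∉ v))).length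

theorem filtNV_le (l v ex : List String) :
    ((l.filter (fun k => decide (k ∉ v ++ ex))).length ≤ (l.filter (fun k => decide (k ∉ v))).length) :=
  (List.monotone_filter_right l (fun a ha => by
    simp only [decide_eq_true_eq, List.mem_append, not_or] at ha ⊢
    exact ha.1)).length_le

theorem filtNV_lt (l v : List String) (n : String) (hn : n ∈ l) (hv : n ∉ v) :
    ((l.filter (fun k => decide (k ∉ v ++ [n]))).length < (l.filter (fun k => decide (k ∉ v))).length) := by
  induction l with
  | nil => cases hn
  | cons a l ih =>
    simp only [List.filter_cons]
    rcases List.mem_cons.mp hn with rfl | hmem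
    · rw [if_neg (by simp), if_pos (by simpa using hv)]
      have := filtNV_le l v [n]
      simp only [List.length_cons]
      omega
    · by_cases h1 : a ∈ v
      · rw [if_neg (by simp [h1]), if_neg (by simpa using h1)]
        exact ih hmem
      · by_cases h2 : a = n
        · subst h2
          rw [if_neg (by simp), if_pos (by simpa using h1)]
          have := filtNV_le l v [a]
          simp only [List.length_cons]
          omega
        · rw [if_pos (by simp [h1, h2]), if_pos (by simpa using h1)]
          simp only [List.length_cons]
          have := ih hmem
          omega

theorem keysNV_lt (g : List (String × List String)) (v : List String) (n : String)
    (hn : n ∈ g.map Prod.fst) (hv : n ∉ v) : keysNV g (v ++ [n]) < keysNV g v :=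
  filtNV_lt _ v n hn hv

-- the for-loop of A over graph[start] (cc = the recursive call at the current fuel/depth)
def loopA (cc : String → List String → Option (Option Bool × List String))
    (depth searchDepth : Int) : List String → List String → Option (Option Bool × List String)
  | [], v => some (none, v)
  | c :: cs, v =>
    if c ∉ v ∧ depth ≤ searchDepth then
      match cc c v with
      | none => none
      | some (r, v') => if r = some true then some (some true, v') else loopA cc depth searchDepth cs v'
    else loopA cc depth searchDepth cs v

-- A's recursion, threading the mutated visited list; fuel is only a totality guard
-- (graph.length + 2 provably suffices on Pre_); none = KeyError or fuel exhausted.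
def ldsA (graph : List (String × List String)) (end_ : String) (searchDepth : Int) :
    Nat → String → List String → Int → Option (Option Bool × List String)
  | 0, _, _, _ => none
  | fuel + 1, start, v, depth =>
    if start = end_ then some (some true, v ++ [start])
    else if start ∈ v then some (some false, v)
    else
      match pyLookup graph start with
      | none => none
      | some children =>
        loopA (fun c w => ldsA graph end_ searchDepth fuel c w (depth + 1))
          (depth + 1) searchDepth children (v ++ [start])

def limitedDepthSearch (graph : List (String × List String)) (start : String) (end_ : String) (visited : List String) (depth : Int) (searchDepth : Int) : Option Bool :=
  match ldsA graph end_ searchDepth (graph.length + 2) start visited depth with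
  | none => none
  | some (r, _) => r

-- ===== PORT B =====

-- the while-loop over the explicit stack of (node, depth) frames; pop = head;
-- `graph[node]` is looked up before the depth test, exactly as in Source B (none = KeyError).
def ldsB (graph : List (String × List String)) (end_ : String) (searchDepth : Int) :
    List (String × Int) → List String → Option Bool
  | [], _ => none
  | (node, d) :: rest, visited =>
    if node ∈ visited then ldsB graph end_ searchDepth rest visited
    else if node = end_ then some true
    else
      match hlook : pyLookup graph node with
      | none => none   -- KeyError, as in the Python
      | some children =>
        if d + 1 ≤ searchDepth then
          ldsB graph end_ searchDepth (children.map (fun c => (c, d + 1)) ++ rest) (visited ++ [node])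
        else ldsB graph end_ searchDepth rest (visited ++ [node])
  termination_by stack visited => (keysNV graph visited, stack.length)
  decreasing_by
  · exact Prod.Lex.right _ (by simp)
  · apply Prod.Lex.left
    refine keysNV_lt _ _ _ ?_ (by assumption)
    exact List.mem_map.mpr ⟨(node, children), pyLookup_mem hlook, rfl⟩
  · apply Prod.Lex.left
    refine keysNV_lt _ _ _ ?_ (by assumption)
    exact List.mem_map.mpr ⟨(node, children), pyLookup_mem hlook, rfl⟩

def limitedDepthSearch_alt (graph : List (String × List String)) (start : String) (end_ : String) (visited : List String) (depth : Int) (searchDepth : Int) : Option Bool :=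
  if start = end_ then some true
  else if start ∈ visited then some false
  else ldsB graph end_ searchDepth [(start, depth)] visited

-- ===== PRECONDITION & SPEC =====
-- Pre_ excludes the inputs on which A can raise KeyError: a dangling reference, i.e. start or a listed
-- neighbour with no adjacency entry (other than the target or an already-visited node, which are never
-- expanded).  Whether A actually raises depends on which nodes the traversal reaches, so Pre_ is the
-- graph's natural well-formedness domain; the Python B raises the same KeyError on the same inputs,
-- and on excluded inputs where A happens to return (the dangling node is never reached) B returns the
-- same value — only the proof does not cover them.
def Pre_limitedDepthSearch (graph : List (String × List String)) (start : String) (end_ : String) (visited : List String) (depth : Int) (searchDepth : Int) : Prop :=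
  start = end_ ∨ start ∈ visited ∨
    (start ∈ graph.map Prod.fst ∧
      ∀ p ∈ graph, ∀ c ∈ p.2, c = end_ ∨ c ∈ graph.map Prod.fst ∨ c ∈ visited)
instance (graph : List (String × List String)) (start : String) (end_ : String) (visited : List String) (depth : Int) (searchDepth : Int) : Decidable (Pre_limitedDepthSearch graph start end_ visited depth searchDepth) := by unfold Pre_limitedDepthSearch; infer_instance

def pvWitness_limitedDepthSearch : (List (String × List String)) × String × String × List String × Int × Int :=
  ([("a", ["b"]), ("b", [])], "a", "b", [], 0, 3)

def Spec_limitedDepthSearch (graph : List (String × List String)) (start : String) (end_ : String) (visited : List String) (depth : Int) (searchDepth : Int) (out : Option Bool) : Prop := out = limitedDepthSearch_alt graph start end_ visited depth searchDepth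
instance (graph : List (String × List String)) (start : String) (end_ : String) (visited : List String) (depth : Int) (searchDepth : Int) (out : Option Bool) : Decidable (Spec_limitedDepthSearch graph start end_ visited depth searchDepth out) := by unfold Spec_limitedDepthSearch; infer_instance

-- ===== CLAIM (what is proved, stated in full; the proofs are below) =====
def Claim_equal_limitedDepthSearch : Prop := ∀ (graph : List (String × List String)) (start : String) (end_ : String) (visited : List String) (depth : Int) (searchDepth : Int), Dom_limitedDepthSearch graph start end_ visited depth searchDepth → Pre_limitedDepthSearch graph start end_ visited depth searchDepth → Spec_limitedDepthSearch graph start end_ visited depth searchDepth (limitedDepthSearch graph start end_ visited depth searchDepth)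

-- ===== LEMMAS AND PROOFS =====

theorem keysNV_append_le (g : List (String × List String)) (v ex : List String) :
    keysNV g (v ++ ex) ≤ keysNV g v := filtNV_le _ v ex

theorem mem_pyLookup {g : List (String × List String)} {k : String}
    (h : k ∈ g.map Prod.fst) : ∃ vs, pyLookup g k = some vs := by
  induction g with
  | nil => simp at h
  | cons p g ih =>
    obtain ⟨k', ws⟩ := p
    by_cases hk : k' = k
    · exact ⟨ws, by simp [pyLookup, hk]⟩
    · have h' : k ∈ g.map Prod.fst := by
        simp only [List.map_cons, List.mem_cons] at h
        rcases h with h | h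
        · exact absurd h.symm hk
        · exact h
      obtain ⟨vs, hvs⟩ := ih h'
      exact ⟨vs, by simp [pyLookup, hk, hvs]⟩

-- one-step equations for ldsA (by the shape of the scrutinised input)
theorem ldsA_zero (g : List (String × List String)) (e : String) (sd : Int) (s : String)
    (v : List String) (d : Int) : ldsA g e sd 0 s v d = none := rfl

theorem ldsA_succ_end (g : List (String × List String)) (e : String) (sd : Int) (f : Nat)
    (s : String) (v : List String) (d : Int) (hse : s = e) :
    ldsA g e sd (f + 1) s v d = some (some true, v ++ [s]) := by
  simp only [ldsA, if_pos hse]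

theorem ldsA_succ_mem (g : List (String × List String)) (e : String) (sd : Int) (f : Nat)
    (s : String) (v : List String) (d : Int) (hse : s ≠ e) (hsv : s ∈ v) :
    ldsA g e sd (f + 1) s v d = some (some false, v) := by
  simp only [ldsA, if_neg hse, if_pos hsv]

theorem ldsA_succ_noneKey (g : List (String × List String)) (e : String) (sd : Int) (f : Nat)
    (s : String) (v : List String) (d : Int) (hse : s ≠ e) (hsv : s ∉ v)
    (hl : pyLookup g s = none) : ldsA g e sd (f + 1) s v d = none := by
  simp only [ldsA, if_neg hse, if_neg hsv, hl]

theorem ldsA_succ_lookup (g : List (String × List String)) (e : String) (sd : Int) (f : Nat)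
    (s : String) (v : List String) (d : Int) {ch : List String} (hse : s ≠ e) (hsv : s ∉ v)
    (hl : pyLookup g s = some ch) :
    ldsA g e sd (f + 1) s v d
      = loopA (fun c w => ldsA g e sd f c w (d + 1)) (d + 1) sd ch (v ++ [s]) := by
  simp only [ldsA, if_neg hse, if_neg hsv, hl]

-- one-step equations for ldsB
theorem ldsB_nil {g : List (String × List String)} {e : String} {sd : Int} {v : List String} :
    ldsB g e sd [] v = none := by simp [ldsB]

theorem ldsB_cons_mem {g : List (String × List String)} {e : String} {sd : Int} {node : String}
    {d : Int} {rest : List (String × Int)} {v : List String} (h : node ∈ v) :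
    ldsB g e sd ((node, d) :: rest) v = ldsB g e sd rest v := by
  simp only [ldsB, if_pos h]

theorem ldsB_cons_end {g : List (String × List String)} {e : String} {sd : Int} {node : String}
    {d : Int} {rest : List (String × Int)} {v : List String} (hcv : node ∉ v) (hce : node = e) :
    ldsB g e sd ((node, d) :: rest) v = some true := by
  simp only [ldsB, if_neg hcv, if_pos hce]

theorem ldsB_cons_push {g : List (String × List String)} {e : String} {sd : Int} {node : String}
    {d : Int} {rest : List (String × Int)} {v : List String} {ch : List String}
    (hcv : node ∉ v) (hce : node ≠ e) (hl : pyLookup g node = some ch) (hnd : d + 1 ≤ sd) :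
    ldsB g e sd ((node, d) :: rest) v
      = ldsB g e sd (ch.map (fun c => (c, d + 1)) ++ rest) (v ++ [node]) := by
  simp only [ldsB, if_neg hcv, if_neg hce]
  split
  · rename_i heq; rw [heq] at hl; cases hl
  · rename_i ch' heq; rw [heq] at hl; cases hl; rw [if_pos hnd]

theorem ldsB_cons_deep {g : List (String × List String)} {e : String} {sd : Int} {node : String}
    {d : Int} {rest : List (String × Int)} {v : List String} {ch : List String}
    (hcv : node ∉ v) (hce : node ≠ e) (hl : pyLookup g node = some ch) (hnd : ¬ d + 1 ≤ sd) :
    ldsB g e sd ((node, d) :: rest) v = ldsB g e sd rest (v ++ [node]) := by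
  simp only [ldsB, if_neg hcv, if_neg hce]
  split
  · rename_i heq; rw [heq] at hl; cases hl
  · rename_i ch' heq; rw [heq] at hl; cases hl; rw [if_neg hnd]

-- the loop only grows the visited list
theorem loopA_mono (cc : String → List String → Option (Option Bool × List String))
    (d sd : Int) (hcc : ∀ c w r w', cc c w = some (r, w') → ∃ ex, w' = w ++ ex) :
    ∀ ch v r v', loopA cc d sd ch v = some (r, v') → ∃ ex, v' = v ++ ex := by
  intro ch
  induction ch with
  | nil => intro v r v' h; simp [loopA] at h; exact ⟨[], by simp [h]⟩
  | cons c cs ih =>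
    intro v r v' h
    simp only [loopA] at h
    split at h
    · cases hcc' : cc c v with
      | none => rw [hcc'] at h; cases h
      | some p =>
        obtain ⟨r₁, w'⟩ := p
        rw [hcc'] at h
        obtain ⟨ex1, hex1⟩ := hcc c v r₁ w' hcc'
        by_cases hr : r₁ = some true
        · simp [hr] at h
          exact ⟨ex1, by rw [← h.2, hex1]⟩
        · simp [hr] at h
          obtain ⟨ex2, hex2⟩ := ih w' r v' h
          exact ⟨ex1 ++ ex2, by rw [hex2, hex1, List.append_assoc]⟩
    · exact ih v r v' h

theorem ldsA_mono (g : List (String × List String)) (e : String) (sd : Int) :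
    ∀ fuel s v d r v', ldsA g e sd fuel s v d = some (r, v') → ∃ ex, v' = v ++ ex := by
  intro fuel
  induction fuel with
  | zero => intro s v d r v' h; cases h
  | succ f ih =>
    intro s v d r v' h
    by_cases hse : s = e
    · rw [ldsA_succ_end g e sd f s v d hse] at h
      exact ⟨[s], by cases h; rfl⟩
    · by_cases hsv : s ∈ v
      · rw [ldsA_succ_mem g e sd f s v d hse hsv] at h
        exact ⟨[], by cases h; simp⟩
      · cases hl : pyLookup g s with
        | none => rw [ldsA_succ_noneKey g e sd f s v d hse hsv hl] at h; cases h
        | some ch =>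
          rw [ldsA_succ_lookup g e sd f s v d hse hsv hl] at h
          obtain ⟨ex, hex⟩ := loopA_mono _ _ _ (fun c w r w' hc => ih c w (d + 1) r w' hc)
            ch (v ++ [s]) r v' h
          exact ⟨[s] ++ ex, by rw [hex, List.append_assoc]⟩

-- depth budget exhausted: the loop skips every child
theorem loopA_deep (cc : String → List String → Option (Option Bool × List String))
    (d sd : Int) (hd : sd < d) : ∀ ch v, loopA cc d sd ch v = some (none, v) := by
  intro ch
  induction ch with
  | nil => intro v; simp [loopA]
  | cons c cs ih =>
    intro v
    simp only [loopA]
    rw [if_neg (by intro hcon; omega)]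
    exact ih v

-- the loop never returns False (only the top-level visited check does)
theorem loopA_no_false (cc : String → List String → Option (Option Bool × List String))
    (d sd : Int) : ∀ ch v r v', loopA cc d sd ch v = some (r, v') → r ≠ some false := by
  intro ch
  induction ch with
  | nil => intro v r v' h; simp [loopA] at h; simp [← h.1]
  | cons c cs ih =>
    intro v r v' h
    simp only [loopA] at h
    split at h
    · cases hcc' : cc c v with
      | none => rw [hcc'] at h; cases h
      | some p =>
        obtain ⟨r₁, w'⟩ := p
        rw [hcc'] at h
        by_cases hr : r₁ = some true
        · simp [hr] at h; simp [← h.1]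
        · simp [hr] at h; exact ih w' r v' h
    · exact ih v r v' h

-- fuel sufficiency of the loop, given sufficiency of the recursive call at this fuel
theorem loopA_suff (g : List (String × List String)) (e : String) (sd : Int) (v₀ : List String)
    (fuel : Nat) (d : Int)
    (hlds : ∀ s v, v₀ ⊆ v → keysNV g v < fuel → (s = e ∨ s ∈ v ∨ s ∈ g.map Prod.fst) →
      ldsA g e sd fuel s v d ≠ none) :
    ∀ ch v, v₀ ⊆ v → keysNV g v < fuel →
      (∀ c ∈ ch, c = e ∨ c ∈ g.map Prod.fst ∨ c ∈ v₀) →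
      loopA (fun c w => ldsA g e sd fuel c w d) d sd ch v ≠ none := by
  intro ch
  induction ch with
  | nil => intro v _ _ _; simp [loopA]
  | cons c cs ih =>
    intro v hsub hk hch
    simp only [loopA]
    split
    · cases hcc' : ldsA g e sd fuel c v d with
      | none =>
        exfalso
        refine hlds c v hsub hk ?_ hcc'
        rcases hch c (List.mem_cons_self ..) with h | h | h
        · exact Or.inl h
        · exact Or.inr (Or.inr h)
        · exact Or.inr (Or.inl (hsub h))
      | some p =>
        obtain ⟨r₁, w'⟩ := p
        obtain ⟨ex, hex⟩ := ldsA_mono g e sd fuel c v d r₁ w' hcc'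
        by_cases hr : r₁ = some true
        · simp [hr]
        · simp [hr]
          refine ih w' (hex ▸ hsub.trans (List.subset_append_left v ex)) ?_
            (fun c' hc' => hch c' (List.mem_cons_of_mem _ hc'))
          calc keysNV g w' ≤ keysNV g v := hex ▸ keysNV_append_le g v ex
            _ < fuel := hk
    · exact ih v hsub hk fun c' hc' => hch c' (List.mem_cons_of_mem _ hc')

-- with enough fuel and every neighbour safe, A's recursion never runs out of fuel or misses a key
theorem ldsA_suff (g : List (String × List String)) (e : String) (sd : Int) (v₀ : List String)
    (hsafe : ∀ p ∈ g, ∀ c ∈ p.2, c = e ∨ c ∈ g.map Prod.fst ∨ c ∈ v₀) :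
    ∀ fuel s v d, v₀ ⊆ v → keysNV g v < fuel → (s = e ∨ s ∈ v ∨ s ∈ g.map Prod.fst) →
      ldsA g e sd fuel s v d ≠ none := by
  intro fuel
  induction fuel with
  | zero => intro s v d _ hk _; omega
  | succ f ih =>
    intro s v d hsub hk hs
    by_cases hse : s = e
    · rw [ldsA_succ_end g e sd f s v d hse]; simp
    · by_cases hsv : s ∈ v
      · rw [ldsA_succ_mem g e sd f s v d hse hsv]; simp
      · have hskey : s ∈ g.map Prod.fst := by
          rcases hs with h | h | h
          · exact absurd h hse
          · exact absurd h hsv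
          · exact h
        obtain ⟨ch, hch⟩ := mem_pyLookup hskey
        rw [ldsA_succ_lookup g e sd f s v d hse hsv hch]
        have hklt : keysNV g (v ++ [s]) < f := by
          have := keysNV_lt g v s hskey hsv
          omega
        refine loopA_suff g e sd v₀ f (d + 1)
          (fun s' v' hsub' hk' hs' => ih s' v' (d + 1) hsub' hk' hs')
          ch (v ++ [s]) (hsub.trans (List.subset_append_left v [s])) hklt ?_
        exact hsafe (s, ch) (pyLookup_mem hch)

-- MAIN SIMULATION: B's stack machine runs exactly A's loop
theorem sim (g : List (String × List String)) (e : String) (sd : Int) :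
    ∀ fuel (d : Int), d ≤ sd → ∀ ch v rest r v',
      loopA (fun c w => ldsA g e sd fuel c w d) d sd ch v = some (r, v') →
      ldsB g e sd (ch.map (fun c => (c, d)) ++ rest) v
        = if r = some true then some true else ldsB g e sd rest v' := by
  intro fuel
  induction fuel with
  | zero =>
    intro d hd ch
    induction ch with
    | nil =>
      intro v rest r v' h
      simp [loopA] at h
      simp [← h.1, ← h.2]
    | cons c cs ih =>
      intro v rest r v' h
      simp only [loopA] at h
      split at h
      · rw [ldsA_zero] at h
        cases h
      · rename_i hg
        have hcv : c ∈ v := by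
          by_contra hcv
          exact hg ⟨hcv, hd⟩
        simp only [List.map_cons, List.cons_append]
        rw [ldsB_cons_mem hcv]
        exact ih v rest r v' h
  | succ f IH =>
    intro d hd ch
    induction ch with
    | nil =>
      intro v rest r v' h
      simp [loopA] at h
      simp [← h.1, ← h.2]
    | cons c cs ih =>
      intro v rest r v' h
      simp only [loopA] at h
      split at h
      · rename_i hg
        obtain ⟨hcv, -⟩ := hg
        by_cases hce : c = e
        · rw [ldsA_succ_end g e sd f c v d hce] at h
          simp at h
          simp only [List.map_cons, List.cons_append]
          rw [ldsB_cons_end hcv hce]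
          simp [← h.1]
        · cases hl : pyLookup g c with
          | none =>
            rw [ldsA_succ_noneKey g e sd f c v d hce hcv hl] at h
            cases h
          | some ch₂ =>
            rw [ldsA_succ_lookup g e sd f c v d hce hcv hl] at h
            cases hres : loopA (fun c' w => ldsA g e sd f c' w (d + 1)) (d + 1) sd ch₂ (v ++ [c]) with
            | none => rw [hres] at h; cases h
            | some p =>
              obtain ⟨r₁, v₁⟩ := p
              rw [hres] at h
              simp only [List.map_cons, List.cons_append]
              by_cases hnd : d + 1 ≤ sd
              · rw [ldsB_cons_push hcv hce hl hnd]
                have hstep := IH (d + 1) hnd ch₂ (v ++ [c]) (cs.map (fun c => (c, d)) ++ rest) r₁ v₁ hres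
                rw [hstep]
                by_cases hr : r₁ = some true
                · simp [hr] at h
                  simp [hr, ← h.1]
                · simp [hr] at h
                  rw [if_neg hr]
                  exact ih v₁ rest r v' h
              · rw [ldsB_cons_deep hcv hce hl hnd]
                have hdeep := loopA_deep (fun c' w => ldsA g e sd f c' w (d + 1)) (d + 1) sd (by omega) ch₂ (v ++ [c])
                rw [hdeep] at hres
                have hr₁ : r₁ = none := by cases hres; rfl
                have hv₁ : v₁ = v ++ [c] := by cases hres; rfl
                simp [hr₁] at h
                rw [← hv₁]
                exact ih v₁ rest r v' (hv₁ ▸ h)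
      · rename_i hg
        have hcv : c ∈ v := by
          by_contra hcv
          exact hg ⟨hcv, hd⟩
        simp only [List.map_cons, List.cons_append]
        rw [ldsB_cons_mem hcv]
        exact ih v rest r v' h

-- ===== VERDICT (by name: the statement is the Claim_ definition above) =====
theorem limitedDepthSearch_spec : Claim_equal_limitedDepthSearch := by
  intro g s e v d sd _ hpre
  unfold Spec_limitedDepthSearch limitedDepthSearch limitedDepthSearch_alt
  by_cases hse : s = e
  · rw [show g.length + 2 = (g.length + 1) + 1 from rfl, ldsA_succ_end g e sd (g.length + 1) s v d hse]
    simp [hse]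
  · by_cases hsv : s ∈ v
    · rw [show g.length + 2 = (g.length + 1) + 1 from rfl, ldsA_succ_mem g e sd (g.length + 1) s v d hse hsv]
      simp [hse, hsv]
    · rcases hpre with h | h | ⟨hskey, hsafe⟩
      · exact absurd h hse
      · exact absurd h hsv
      · obtain ⟨ch, hch⟩ := mem_pyLookup hskey
        rw [show g.length + 2 = (g.length + 1) + 1 from rfl,
          ldsA_succ_lookup g e sd (g.length + 1) s v d hse hsv hch]
        simp only [if_neg hse, if_neg hsv]
        by_cases hnd : d + 1 ≤ sd
        · rw [ldsB_cons_push hsv hse hch hnd]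
          have hkb : keysNV g v < g.length + 2 := by
            have h1 : keysNV g v ≤ (g.map Prod.fst).length := List.length_filter_le _ _
            simp only [List.length_map] at h1
            omega
          have hsuff := ldsA_suff g e sd v hsafe (g.length + 2) s v d (List.Subset.refl v) hkb
            (Or.inr (Or.inr hskey))
          rw [show g.length + 2 = (g.length + 1) + 1 from rfl,
            ldsA_succ_lookup g e sd (g.length + 1) s v d hse hsv hch] at hsuff
          cases hres : loopA (fun c w => ldsA g e sd (g.length + 1) c w (d + 1)) (d + 1) sd ch (v ++ [s]) with
          | none => exact absurd hres hsuff
          | some p =>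
            obtain ⟨r, v'⟩ := p
            have hstep := sim g e sd (g.length + 1) (d + 1) hnd ch (v ++ [s]) [] r v' hres
            rw [hstep]
            have hnf := loopA_no_false _ _ _ ch (v ++ [s]) r v' hres
            cases r with
            | none => simp [ldsB_nil]
            | some b =>
              cases b with
              | true => simp
              | false => exact absurd rfl hnf
        · rw [ldsB_cons_deep hsv hse hch hnd]
          have hdeep := loopA_deep (fun c w => ldsA g e sd (g.length + 1) c w (d + 1)) (d + 1) sd (by omega) ch (v ++ [s])
          rw [hdeep, ldsB_nil]
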